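-- pv_equiv track=rewrite | github.com/Gravitar64/A-beautiful-code-in-Python | Teil_81_Nonogramme.py | gen_permutationen
-- ===== SOURCE A (Python) =====
-- import itertools as itt
--
-- def gen_permutationen(einträge, länge):
--   permutationen = []
--   anz_blöcke = len(einträge)
--   anz_leer = länge-sum(einträge)-anz_blöcke+1
--   for v in itt.combinations(range(anz_blöcke+anz_leer), anz_blöcke):
--     v = [v[0]]+[b-a for a,b in zip(v,v[1:])]
--     p= ''.join(['2'*pos+'1'*einträge[i] for i,pos in enumerate(v)])
--     p+='2'*(anz_leer)
--     permutationen.append(p[:länge])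
--   return permutationen
-- ===== SOURCE B (Python) =====
-- def gen_permutationen(einträge, länge):
--     frei = länge - sum(einträge) - len(einträge) + 1
--     if frei < 0:
--         return []
--
--     def go(blocks, rest, prefix, sep):
--         if not blocks:
--             return [(prefix + '2' * frei)[:länge]]
--         out = []
--         for lead in range(rest + 1):
--             out += go(blocks[1:], rest - lead,
--                       prefix + sep + '2' * lead + '1' * blocks[0], '2')
--         return out
--
--     return go(einträge, frei, '', '')
-- ===== Notes on version B (the rewrite author's own statement) =====
-- stated objective: alternative
-- what changed: Replaces the itertools.combinations pipeline (choose absolute positions, recover gaps via pairwise differences of the tuple, indexed join, truncate) by direct recursive placement: each block is emitted with its chosen number of leading empties and a mandatory separator, recursing on the remaining blocks and remaining free empties, which yields the same strings in the same lexicographic order.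
import Mathlib
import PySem

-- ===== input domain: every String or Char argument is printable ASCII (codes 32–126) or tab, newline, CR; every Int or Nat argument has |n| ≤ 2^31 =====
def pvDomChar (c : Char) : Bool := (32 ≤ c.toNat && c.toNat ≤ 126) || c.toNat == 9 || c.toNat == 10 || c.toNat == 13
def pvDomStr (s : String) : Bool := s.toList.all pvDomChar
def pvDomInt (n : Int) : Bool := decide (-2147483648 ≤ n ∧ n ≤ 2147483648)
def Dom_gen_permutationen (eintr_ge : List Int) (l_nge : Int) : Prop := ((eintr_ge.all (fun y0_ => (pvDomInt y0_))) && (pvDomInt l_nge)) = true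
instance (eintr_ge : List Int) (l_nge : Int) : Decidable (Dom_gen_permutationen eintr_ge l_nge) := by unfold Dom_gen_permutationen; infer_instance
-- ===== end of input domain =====

-- B replaces A's itertools.combinations pipeline (choose positions, re-derive gaps as
-- pairwise differences, indexed join, truncate) by direct recursive placement of each
-- block with its leading empties; objective: alternative decomposition, same enumeration.

-- shared primitive: Python "c"*n on a char list (both sources use '2'*n / '1'*n)
def pvRep (c : Char) (n : Int) : List Char := PySem.List.pyRepeat [c] n

-- ===== PORT A =====
def gen_permutationen (eintr_ge : List Int) (l_nge : Int) : List String :=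
  let anz_bloecke : Int := eintr_ge.length
  let anz_leer : Int := l_nge - eintr_ge.sum - anz_bloecke + 1
  (PySem.List.combinations (PySem.List.pyRange 0 (anz_bloecke + anz_leer)) eintr_ge.length).map
    (fun v =>
      -- v = [v[0]] + [b-a for a,b in zip(v, v[1:])]; v[0] raises IndexError exactly when
      -- einträge = [] (excluded by Pre_); headD only totalises that excluded case
      let v2 := v.headD 0 :: (v.zip v.tail).map (fun ab => ab.2 - ab.1)
      -- ''.join(['2'*pos + '1'*einträge[i] for i, pos in enumerate(v)]); i < len(einträge) always
      let p := PySem.Chars.join [] ((PySem.List.enumerate v2).map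
        (fun ip => pvRep '2' ip.2 ++ pvRep '1' (PySem.List.pyGetD eintr_ge ip.1 0)))
      String.ofList (PySem.List.slice (p ++ pvRep '2' anz_leer) none (some l_nge)))

-- ===== PORT B =====
def pvGo (frei l_nge : Int) : List Int → Int → List Char → List Char → List String
  | [], _rest, pre, _sep =>
      [String.ofList (PySem.List.slice (pre ++ pvRep '2' frei) none (some l_nge))]
  | b :: bs, rest, pre, sep =>
      (PySem.List.pyRange 0 (rest + 1)).flatMap
        (fun lead => pvGo frei l_nge bs (rest - lead) (pre ++ sep ++ pvRep '2' lead ++ pvRep '1' b) ['2'])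

def gen_permutationen_alt (eintr_ge : List Int) (l_nge : Int) : List String :=
  let frei : Int := l_nge - eintr_ge.sum - eintr_ge.length + 1
  if frei < 0 then [] else pvGo frei l_nge eintr_ge frei [] []

-- ===== PRECONDITION & SPEC =====
-- Pre_ excludes only empty einträge, where A raises IndexError (v[0] of the empty combination).
def Pre_gen_permutationen (eintr_ge : List Int) (l_nge : Int) : Prop := eintr_ge ≠ []
instance (eintr_ge : List Int) (l_nge : Int) : Decidable (Pre_gen_permutationen eintr_ge l_nge) := by unfold Pre_gen_permutationen; infer_instance
def pvWitness_gen_permutationen : List Int × Int := ([1, 2], 6)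

def Spec_gen_permutationen (eintr_ge : List Int) (l_nge : Int) (out : List String) : Prop := out = gen_permutationen_alt eintr_ge l_nge
instance (eintr_ge : List Int) (l_nge : Int) (out : List String) : Decidable (Spec_gen_permutationen eintr_ge l_nge out) := by unfold Spec_gen_permutationen; infer_instance

-- ===== CLAIM (what is proved, stated in full; the proofs are below) =====
def Claim_equal_gen_permutationen : Prop := ∀ (eintr_ge : List Int) (l_nge : Int), Dom_gen_permutationen eintr_ge l_nge → Pre_gen_permutationen eintr_ge l_nge → Spec_gen_permutationen eintr_ge l_nge (gen_permutationen eintr_ge l_nge)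

-- ===== LEMMAS AND PROOFS =====

-- A's gap list [v0, v1-v0, v2-v1, …] as a recursion on v carrying the previous position
def diffsFrom (prev : Int) : List Int → List Int
  | [] => []
  | c :: cs => (c - prev) :: diffsFrom c cs

-- A's joined string from the block list and the gap list, zipped structurally
def zipR : List Int → List Int → List Char
  | e :: es, g :: gs => pvRep '2' g ++ pvRep '1' e ++ zipR es gs
  | _, _ => []

-- A's joined string from the block list and the chosen positions v directly
def renderA (sep : List Char) (b : Int) : List Int → List Int → List Char
  | e :: es, c :: cs => sep ++ pvRep '2' (c - b) ++ pvRep '1' e ++ renderA ['2'] (c + 1) es cs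
  | _, _ => []

lemma pvRep_succ (c : Char) (n : Int) (h : 0 ≤ n) : pvRep c (n + 1) = c :: pvRep c n := by
  simp [pvRep, PySem.List.pyRepeat_singleton]
  rw [show (n+1).toNat = n.toNat + 1 by omega]
  simp [List.replicate_succ]

lemma length_diffsFrom (prev : Int) (v : List Int) : (diffsFrom prev v).length = v.length := by
  induction v generalizing prev with
  | nil => rfl
  | cons c cs ih => simp [diffsFrom, ih]

lemma zipdiffW (v : List Int) (c : Int) :
    List.zipWith (fun x y => y - x) (c :: v) v = diffsFrom c v := by
  induction v generalizing c with
  | nil => rfl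
  | cons c' cs ih => simp [diffsFrom, List.zipWith, ih c']

lemma zipdiff (v : List Int) (c : Int) :
    ((c :: v).zip v).map (fun ab => ab.2 - ab.1) = diffsFrom c v := by
  simp [List.zip]
  exact zipdiffW v c

lemma joinNil (parts : List (List Char)) : PySem.Chars.join [] parts = parts.flatten := by
  induction parts with
  | nil => rfl
  | cons p ps ih =>
    cases ps with
    | nil => simp [PySem.Chars.join, List.intercalate]
    | cons q qs =>
      simp only [PySem.Chars.join, List.intercalate, List.intersperse] at ih ⊢
      simp [ih]

lemma joinE (gs : List Int) (full : List Int) (s : Nat) (h : s + gs.length ≤ full.length) :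
    PySem.Chars.join [] ((PySem.List.enumerate gs (s : Int)).map
      (fun ip => pvRep '2' ip.2 ++ pvRep '1' (PySem.List.pyGetD full ip.1 0)))
    = zipR (full.drop s) gs := by
  induction gs generalizing s with
  | nil =>
    have : zipR (full.drop s) [] = [] := by
      cases full.drop s <;> rfl
    simp [PySem.List.enumerate, this]
  | cons g gs ih =>
    have hs : s < full.length := by simp at h; omega
    rw [PySem.List.enumerate_cons, List.map_cons, joinNil, List.flatten_cons,
        List.drop_eq_getElem_cons hs]
    have h1 : PySem.List.pyGetD full (s : Int) 0 = full[s] := by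
      rw [PySem.List.pyGetD_natCast, List.getD_eq_getElem _ _ hs]
    have h2 : ((s : Int) + 1) = ((s + 1 : Nat) : Int) := by push_cast; ring
    rw [h1, h2, ← joinNil, ih (s+1) (by simp at h ⊢; omega)]
    simp [zipR]

lemma zipR_renderA (v : List Int) (es : List Int) (prev : Int)
    (hpw : v.Pairwise (· < ·)) (hgt : ∀ x ∈ v, prev < x) :
    zipR es (diffsFrom prev v) = renderA ['2'] (prev + 1) es v := by
  induction v generalizing prev es with
  | nil => cases es <;> rfl
  | cons c cs ih =>
    cases es with
    | nil => rfl
    | cons e es' =>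
      rw [List.pairwise_cons] at hpw
      have hc : prev < c := hgt c (by simp)
      have hrep : pvRep '2' (c - prev) = '2' :: pvRep '2' (c - (prev + 1)) := by
        have := pvRep_succ '2' (c - (prev + 1)) (by omega)
        rw [show c - (prev+1) + 1 = c - prev by ring] at this
        exact this
      show pvRep '2' (c - prev) ++ pvRep '1' e ++ zipR es' (diffsFrom c cs)
          = ['2'] ++ pvRep '2' (c - (prev + 1)) ++ pvRep '1' e ++ renderA ['2'] (c + 1) es' cs
      rw [ih es' c hpw.2 hpw.1, hrep]
      simp

lemma bodyA_eq (eintr : List Int) (l frei : Int) (v : List Int)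
    (hlen : v.length = eintr.length) (hne : eintr ≠ [])
    (hpw : v.Pairwise (· < ·)) :
    String.ofList (PySem.List.slice (PySem.Chars.join [] ((PySem.List.enumerate
        (v.headD 0 :: (v.zip v.tail).map (fun ab => ab.2 - ab.1))).map
        (fun ip => pvRep '2' ip.2 ++ pvRep '1' (PySem.List.pyGetD eintr ip.1 0)))
      ++ pvRep '2' frei) none (some l))
    = String.ofList (PySem.List.slice ([] ++ renderA [] 0 eintr v ++ pvRep '2' frei) none (some l)) := by
  match v, eintr with
  | [], ei =>
    cases ei with
    | nil => exact absurd rfl hne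
    | cons _ _ => simp at hlen
  | c :: cs, e :: es =>
    congr 2
    have hz : (c :: cs).headD 0 :: ((c :: cs).zip (c :: cs).tail).map (fun ab => ab.2 - ab.1)
        = diffsFrom 0 (c :: cs) := by
      simp [diffsFrom, zipdiff cs c]
    rw [hz]
    have hj := joinE (diffsFrom 0 (c :: cs)) (e :: es) 0
      (by simp [length_diffsFrom]; simpa using hlen.le)
    simp only [Nat.cast_zero, List.drop_zero] at hj
    rw [hj]
    rw [List.pairwise_cons] at hpw
    have key : zipR (e :: es) (diffsFrom 0 (c :: cs)) = renderA [] 0 (e :: es) (c :: cs) := by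
      simp only [diffsFrom, zipR, renderA]
      rw [zipR_renderA cs es c hpw.2 hpw.1]
      simp
    rw [key]
    simp

lemma combC (m k : Nat) (b : Int) :
    PySem.List.combinations (PySem.List.pyRange b (b + (k + 1) + m)) (k + 1)
    = (PySem.List.pyRange 0 ((m : Int) + 1)).flatMap (fun lead =>
        (PySem.List.combinations (PySem.List.pyRange (b + lead + 1) (b + (k + 1) + m)) k).map
          (fun cs => (b + lead) :: cs)) := by
  induction m generalizing b with
  | zero =>
    simp only [Nat.cast_zero, add_zero]
    rw [PySem.List.pyRange_one_cons (by omega : b < b + ((k:Int)+1)),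
        PySem.List.combinations_cons_succ]
    rw [PySem.List.combinations_eq_nil_of_length_lt (r := k+1)
      (PySem.List.pyRange (b+1) (b + ((k:Int) + 1)))
      (by rw [PySem.List.length_pyRange_one]; omega)]
    rw [PySem.List.pyRange_one_singleton 0]
    simp
  | succ m ih =>
    rw [PySem.List.pyRange_one_cons (by omega : b < b + (k+1) + ((m+1:Nat):Int)),
        PySem.List.combinations_cons_succ]
    have hU : b + (k + 1) + ((m+1:Nat):Int) = (b+1) + (k+1) + (m:Int) := by push_cast; ring
    rw [hU, ih (b+1)]
    rw [show ((m+1:Nat):Int) + 1 = (m:Int) + 1 + 1 by push_cast; ring]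
    rw [PySem.List.pyRange_one_cons (by omega : (0:Int) < (m:Int) + 1 + 1)]
    rw [List.flatMap_cons]
    congr 1
    · simp
    · rw [show ((0:Int)+1) = 1 by norm_num]
      rw [PySem.List.pyRange_one 0 ((m:Int)+1), PySem.List.pyRange_one 1 ((m:Int)+1+1)]
      rw [show ((m:Int)+1-0).toNat = m+1 by omega, show ((m:Int)+1+1-1).toNat = m+1 by omega]
      rw [List.flatMap_map, List.flatMap_map]
      apply List.flatMap_congr
      intro j _
      have h1 : b + 1 + (0 + (j:Int)) + 1 = b + (1 + (j:Int)) + 1 := by ring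
      have h2 : b + 1 + (0 + (j:Int)) = b + (1 + (j:Int)) := by ring
      rw [h1, h2]

lemma mainG (es : List Int) (frei l_nge : Int) (b rest : Int) (pre sep : List Char)
    (h : 0 ≤ rest) :
    (PySem.List.combinations (PySem.List.pyRange b (b + es.length + rest)) es.length).map
      (fun v => String.ofList (PySem.List.slice (pre ++ renderA sep b es v ++ pvRep '2' frei) none (some l_nge)))
    = pvGo frei l_nge es rest pre sep := by
  induction es generalizing b rest pre sep with
  | nil => simp [pvGo, renderA, PySem.List.combinations_zero]
  | cons e es' ih =>
    have hm : rest = ((rest.toNat : Nat) : Int) := (Int.toNat_of_nonneg h).symm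
    rw [hm]
    set m := rest.toNat with hmdef
    rw [show (e :: es').length = es'.length + 1 from rfl]
    rw [show b + ((es'.length + 1 : Nat) : Int) + (m : Int)
        = b + ((es'.length : Int) + 1) + (m : Int) by push_cast; ring]
    rw [combC m es'.length b]
    rw [List.map_flatMap]
    show _ = pvGo frei l_nge (e :: es') ((m:Int)) pre sep
    simp only [pvGo]
    apply List.flatMap_congr
    intro lead hlead
    rw [PySem.List.mem_pyRange_one] at hlead
    rw [List.map_map]
    rw [show b + ((es'.length : Int) + 1) + (m : Int)
        = (b + lead + 1) + (es'.length : Int) + ((m : Int) - lead) by ring]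
    rw [← ih (b + lead + 1) ((m : Int) - lead)
        (pre ++ sep ++ pvRep '2' lead ++ pvRep '1' e) ['2'] (by omega)]
    refine List.map_congr_left ?_
    intro cs _
    have hl : b + lead - b = lead := by ring
    simp [renderA, hl, List.append_assoc]

-- ===== VERDICT (by name: the statement is the Claim_ definition above) =====
theorem gen_permutationen_spec : Claim_equal_gen_permutationen := by
  intro eintr l _hdom hpre
  unfold Spec_gen_permutationen
  simp only [gen_permutationen, gen_permutationen_alt]
  have hn : 0 < eintr.length := List.length_pos_of_ne_nil hpre
  by_cases hf : l - eintr.sum - (eintr.length : Int) + 1 < 0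
  · rw [if_pos hf]
    rw [PySem.List.combinations_eq_nil_of_length_lt (r := eintr.length)
      (PySem.List.pyRange 0 ((eintr.length : Int) + (l - eintr.sum - (eintr.length : Int) + 1)))
      (by rw [PySem.List.length_pyRange_one]; omega)]
    simp
  · rw [if_neg hf]
    push_neg at hf
    rw [List.map_congr_left (fun v hv => bodyA_eq eintr l
        (l - eintr.sum - (eintr.length : Int) + 1) v
        (PySem.List.length_of_mem_combinations hv) hpre
        ((PySem.List.pairwise_lt_pyRange_one _ _).sublist
          (PySem.List.sublist_of_mem_combinations hv)))]
    rw [show (eintr.length : Int) + (l - eintr.sum - (eintr.length : Int) + 1)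
        = 0 + (eintr.length : Int) + (l - eintr.sum - (eintr.length : Int) + 1) by ring]
    exact mainG eintr _ l 0 _ [] [] hf
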